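-- pv_equiv track=rewrite | github.com/anhducnguyen2006/KaijuCatsAI | State.py | budget_used
-- ===== SOURCE A (Python) =====
-- COMMANDS_COST = {"N": 10, "S": 10, "E": 10, "W": 10, "SP": 20, "PU": 30}
--
-- def budget_used(instructions):
--     total = 0
--     for row in instructions:
--         for cell in row:
--             if cell is not None:
--                 for cmd in cell:
--                     if cmd is not None:
--                         total += COMMANDS_COST[cmd]
--     return total
-- ===== SOURCE B (Python) =====
-- COMMANDS_COST = {"N": 10, "S": 10, "E": 10, "W": 10, "SP": 20, "PU": 30}
--
-- def budget_used(instructions):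
--     cmds = [cmd
--             for row in instructions
--             for cell in row if cell is not None
--             for cmd in cell if cmd is not None]
--     counts = {}
--     for c in cmds:
--         counts[c] = counts.get(c, 0) + 1
--     return sum(n * COMMANDS_COST[c] for c, n in counts.items())
-- ===== Notes on version B (the rewrite author's own statement) =====
-- stated objective: alternative
-- what changed: B flattens the grid's non-None commands into a single list, tallies it into a frequency dictionary, and computes the total as a weighted sum over the distinct commands; A accumulates each command's cost directly inside the nested loops.
import Mathlib
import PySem

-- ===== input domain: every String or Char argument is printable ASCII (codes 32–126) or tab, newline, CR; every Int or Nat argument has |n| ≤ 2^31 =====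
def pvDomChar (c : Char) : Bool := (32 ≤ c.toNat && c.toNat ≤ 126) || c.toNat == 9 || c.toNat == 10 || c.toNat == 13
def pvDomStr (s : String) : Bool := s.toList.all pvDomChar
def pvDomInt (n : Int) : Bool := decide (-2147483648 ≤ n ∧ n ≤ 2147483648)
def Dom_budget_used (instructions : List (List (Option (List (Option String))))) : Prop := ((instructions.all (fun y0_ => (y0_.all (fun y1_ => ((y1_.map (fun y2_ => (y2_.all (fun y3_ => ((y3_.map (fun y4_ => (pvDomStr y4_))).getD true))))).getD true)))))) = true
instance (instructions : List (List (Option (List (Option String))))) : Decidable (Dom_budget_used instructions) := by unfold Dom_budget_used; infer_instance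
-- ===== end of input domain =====

-- B replaces A's running cost accumulation by a two-pass scheme: a frequency dictionary
-- of the commands built first, then a weighted sum over the distinct commands (alternative decomposition).

-- ===== PORT A =====
def pvCost : PySem.Dict String Int :=
  PySem.Dict.ofList [("N", 10), ("S", 10), ("E", 10), ("W", 10), ("SP", 20), ("PU", 30)]

-- COMMANDS_COST[cmd] raises KeyError on an unknown command; Pre_ excludes those inputs, so getD's default is never reached on admitted inputs.
def budget_used (instructions : List (List (Option (List (Option String))))) : Int :=
  instructions.foldl (fun total row =>
    row.foldl (fun total cell =>
      match cell with
      | none => total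
      | some cmds =>
        cmds.foldl (fun total cmd =>
          match cmd with
          | none => total
          | some c => total + pvCost.getD c 0) total) total) 0

-- ===== PORT B =====
def budget_used_alt (instructions : List (List (Option (List (Option String))))) : Int :=
  let cmds : List String :=
    instructions.flatMap (fun row =>
      row.flatMap (fun cell =>
        match cell with
        | none => []
        | some cs => cs.filterMap (fun cmd => cmd)))
  let counts : PySem.Dict String Int :=
    cmds.foldl (fun d c => d.insert c (d.getD c 0 + 1)) PySem.Dict.empty
  counts.items.foldl (fun t p => t + p.2 * pvCost.getD p.1 0) 0

-- ===== PRECONDITION & SPEC =====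
-- Pre_ excludes exactly the inputs containing a command outside COMMANDS_COST, on which Python A raises KeyError.
def Pre_budget_used (instructions : List (List (Option (List (Option String))))) : Prop :=
  (instructions.all (fun row => row.all (fun cell =>
    match cell with
    | none => true
    | some cmds => cmds.all (fun cmd =>
        match cmd with
        | none => true
        | some c => ["N", "S", "E", "W", "SP", "PU"].contains c)))) = true

instance (instructions : List (List (Option (List (Option String))))) : Decidable (Pre_budget_used instructions) := by unfold Pre_budget_used; infer_instance

def pvWitness_budget_used : List (List (Option (List (Option String)))) :=
  [[some [some "N", none, some "SP"], none], [some [some "PU"]], []]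

def Spec_budget_used (instructions : List (List (Option (List (Option String))))) (out : Int) : Prop := out = budget_used_alt instructions
instance (instructions : List (List (Option (List (Option String))))) (out : Int) : Decidable (Spec_budget_used instructions out) := by unfold Spec_budget_used; infer_instance

-- ===== CLAIM (what is proved, stated in full; the proofs are below) =====
def Claim_equal_budget_used : Prop := ∀ (instructions : List (List (Option (List (Option String))))), Dom_budget_used instructions → Pre_budget_used instructions → Spec_budget_used instructions (budget_used instructions)

-- ===== LEMMAS AND PROOFS =====

-- the non-None commands of the grid, in traversal order
def pvCmds (instructions : List (List (Option (List (Option String))))) : List String :=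
  instructions.flatMap (fun row => row.flatMap (fun cell => (cell.getD []).filterMap id))

-- generic: a fold accumulating `t + f x` is the sum of the mapped list
theorem pv_foldl_add_eq_sum {α : Type} (f : α → Int) (l : List α) (t : Int) :
    l.foldl (fun t x => t + f x) t = t + (l.map f).sum := by
  induction l generalizing t with
  | nil => simp
  | cons h tl ih => simp [ih]; ring

-- A's innermost loop sums the costs of the non-None commands
theorem pvA_cell (cmds : List (Option String)) (t : Int) :
    cmds.foldl (fun t cmd => match cmd with | none => t | some c => t + pvCost.getD c 0) t
      = t + ((cmds.filterMap id).map (fun c => pvCost.getD c 0)).sum := by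
  induction cmds generalizing t with
  | nil => simp
  | cons h tl ih =>
    cases h with
    | none => simp [ih]
    | some c => simp [ih]; ring

theorem pvA_row (row : List (Option (List (Option String)))) (t : Int) :
    row.foldl (fun t cell =>
      match cell with
      | none => t
      | some cmds =>
        cmds.foldl (fun t cmd => match cmd with | none => t | some c => t + pvCost.getD c 0) t) t
      = t + ((row.flatMap (fun cell => (cell.getD []).filterMap id)).map (fun c => pvCost.getD c 0)).sum := by
  induction row generalizing t with
  | nil => simp
  | cons h tl ih =>
    cases h with
    | none => simpa using ih t
    | some cmds =>
      simp only [List.foldl_cons]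
      rw [ih]
      simp [pvA_cell, List.sum_append]
      ring

theorem pvA_grid (instructions : List (List (Option (List (Option String))))) (t : Int) :
    instructions.foldl (fun total row =>
      row.foldl (fun total cell =>
        match cell with
        | none => total
        | some cmds =>
          cmds.foldl (fun total cmd =>
            match cmd with
            | none => total
            | some c => total + pvCost.getD c 0) total) total) t
      = t + ((pvCmds instructions).map (fun c => pvCost.getD c 0)).sum := by
  induction instructions generalizing t with
  | nil => simp [pvCmds]
  | cons r rs ih =>
    simp only [List.foldl_cons]
    rw [ih, pvA_row]
    simp [pvCmds, List.sum_append]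
    ring

-- weighted sum over distinct commands = plain sum over all commands
theorem pv_count_sum (cost : String → Int) (L : List String) :
    ((PySem.Set.ofList L).map (fun k => (L.count k : Int) * cost k)).sum = (L.map cost).sum := by
  classical
  rw [← List.sum_toFinset _ (PySem.Set.nodup_ofList L)]
  have hfs : (PySem.Set.ofList L).toFinset = L.toFinset := by
    ext x; simp [PySem.Set.mem_ofList]
  rw [hfs]
  have h := Finset.sum_multiset_map_count (L : Multiset String) cost
  simp only [Multiset.map_coe, Multiset.sum_coe, Multiset.coe_count] at h
  rw [h]
  apply Finset.sum_congr rfl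
  intro x _
  simp

-- B's flattened command list is pvCmds
theorem pvB_cmds (instructions : List (List (Option (List (Option String))))) :
    instructions.flatMap (fun row =>
      row.flatMap (fun cell =>
        match cell with
        | none => []
        | some cs => cs.filterMap (fun cmd => cmd)))
      = pvCmds instructions := by
  unfold pvCmds
  congr 1
  funext row
  congr 1
  funext cell
  cases cell <;> rfl

theorem pvB_eq_sum (instructions : List (List (Option (List (Option String))))) :
    budget_used_alt instructions = ((pvCmds instructions).map (fun c => pvCost.getD c 0)).sum := by
  unfold budget_used_alt
  simp only [pvB_cmds, PySem.Dict.foldl_insert_getD_add_one_eq_counter,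
    pv_foldl_add_eq_sum, PySem.Dict.items_counter, List.map_map]
  simpa using pv_count_sum (fun c => pvCost.getD c 0) (pvCmds instructions)

-- ===== VERDICT (by name: the statement is the Claim_ definition above) =====
theorem budget_used_spec : Claim_equal_budget_used := by
  intro instructions _ _
  unfold Spec_budget_used budget_used
  rw [pvA_grid, pvB_eq_sum]
  simp
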